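-- pv_equiv track=rewrite | github.com/ULJ-Yale/qunex | python/qx_utilities/general/utilities.py | _find_enclosed_substrings
-- ===== SOURCE A (Python) =====
-- def _find_enclosed_substrings(input_string, start_delimiter="{{", end_delimiter="}}"):
--     """
--     Find all substrings enclosed by start and end delimiters in a string.
--     """
--     substrings = []
--     start_index = 0
--
--     while True:
--         start_pos = input_string.find(start_delimiter, start_index)
--         if start_pos == -1:
--             break
--
--         end_pos = input_string.find(end_delimiter, start_pos + len(start_delimiter))
--         if end_pos == -1:
--             break
--
--         substrings.append(input_string[start_pos : (end_pos + len(end_delimiter))])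
--         start_index = end_pos + len(end_delimiter)
--
--     return substrings
-- ===== SOURCE B (Python) =====
-- def _find_enclosed_substrings(input_string, start_delimiter="{{", end_delimiter="}}"):
--     """Scan once: precompute all occurrence positions of each delimiter, then
--     pair them up with a two-pointer merge instead of repeated find-and-advance."""
--     n = len(input_string)
--     starts = [i for i in range(n + 1) if input_string.startswith(start_delimiter, i)]
--     ends = [i for i in range(n + 1) if input_string.startswith(end_delimiter, i)]
--     result = []
--     cursor = 0
--     ei = 0
--     for sp in starts:
--         if sp < cursor:
--             continue
--         while ei < len(ends) and ends[ei] < sp + len(start_delimiter):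
--             ei += 1
--         if ei == len(ends):
--             break
--         stop = ends[ei] + len(end_delimiter)
--         result.append(input_string[sp:stop])
--         cursor = stop
--     return result
-- ===== Notes on version B (the rewrite author's own statement) =====
-- stated objective: alternative
-- what changed: Instead of A's repeated find-and-advance scanning, B precomputes the lists of all occurrence positions of each delimiter once and pairs them up with a single two-pointer merge (cursor over starts, monotone pointer over ends).
-- outside the precondition, e.g. on _find_enclosed_substrings('abc', '', ''): A does not finish within the time limit, B returns ['', '', '', '']
import Mathlib
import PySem

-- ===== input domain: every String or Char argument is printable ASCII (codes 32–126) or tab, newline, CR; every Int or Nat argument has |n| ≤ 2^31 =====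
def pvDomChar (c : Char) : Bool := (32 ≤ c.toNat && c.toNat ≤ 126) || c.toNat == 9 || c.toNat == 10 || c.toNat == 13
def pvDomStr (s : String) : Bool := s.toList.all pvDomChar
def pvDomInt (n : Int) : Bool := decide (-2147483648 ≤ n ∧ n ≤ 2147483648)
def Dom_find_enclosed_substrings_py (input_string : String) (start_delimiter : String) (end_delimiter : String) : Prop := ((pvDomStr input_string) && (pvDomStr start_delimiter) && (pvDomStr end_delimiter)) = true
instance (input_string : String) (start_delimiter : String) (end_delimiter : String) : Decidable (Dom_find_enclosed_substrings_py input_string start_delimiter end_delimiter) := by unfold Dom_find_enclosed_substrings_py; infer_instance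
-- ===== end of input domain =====

-- B replaces A's repeated find-and-advance scan by precomputing both delimiters' occurrence
-- positions once and pairing them with a single two-pointer merge (objective: alternative).

-- ===== PORT A =====
-- the 'while True' loop, ported with fuel |input|+2 (on Pre_ inputs the start index strictly
-- increases and stays ≤ |input|, so the Python loop makes at most |input|+1 iterations);
-- input_string.find(d, i) is PySem.Chars.findFrom on the code points.
def goA (inp s e : List Char) : Nat → Int → List String
  | 0, _ => []
  | fuel+1, start_index =>
    let start_pos := PySem.Chars.findFrom inp s start_index
    if start_pos = -1 then []
    else
      let end_pos := PySem.Chars.findFrom inp e (start_pos + s.length)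
      if end_pos = -1 then []
      else
        String.ofList (PySem.Chars.slice inp (some start_pos) (some (end_pos + e.length)))
          :: goA inp s e fuel (end_pos + e.length)

def find_enclosed_substrings_py (input_string : String) (start_delimiter : String) (end_delimiter : String) : List String :=
  goA input_string.toList start_delimiter.toList end_delimiter.toList (input_string.toList.length + 2) 0

-- ===== PORT B =====
-- input_string.startswith(d, i) for 0 ≤ i ≤ len is exactly startswith on the dropped suffix.
def pvOcc (inp sub : List Char) : List Nat :=
  (List.range (inp.length + 1)).filter (fun i => PySem.Chars.startswith (inp.drop i) sub)

-- the 'for sp in starts' loop; the inner 'while' advancing the ends pointer is the dropWhile,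
-- and the surviving ends suffix (pointer ei onwards) is threaded to the next iteration.
def goB (inp : List Char) (ls le : Nat) : List Nat → List Nat → Nat → List String
  | [], _, _ => []
  | sp :: rest, ends, cursor =>
    if sp < cursor then goB inp ls le rest ends cursor
    else
      match ends.dropWhile (fun ep => decide (ep < sp + ls)) with
      | [] => []
      | ep :: erest =>
        String.ofList (PySem.Chars.slice inp (some (sp : Int)) (some ((ep + le : Nat) : Int)))
          :: goB inp ls le rest (ep :: erest) (ep + le)

def find_enclosed_substrings_py_alt (input_string : String) (start_delimiter : String) (end_delimiter : String) : List String :=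
  goB input_string.toList start_delimiter.toList.length end_delimiter.toList.length
    (pvOcc input_string.toList start_delimiter.toList)
    (pvOcc input_string.toList end_delimiter.toList) 0

-- ===== PRECONDITION & SPEC =====
-- Pre_ excludes only the inputs on which Python A never returns: with both delimiters empty,
-- find("", i) always succeeds and the scan index never advances, so A loops forever.
def Pre_find_enclosed_substrings_py (input_string : String) (start_delimiter : String) (end_delimiter : String) : Prop :=
  ¬ (start_delimiter = "" ∧ end_delimiter = "")
instance (input_string : String) (start_delimiter : String) (end_delimiter : String) : Decidable (Pre_find_enclosed_substrings_py input_string start_delimiter end_delimiter) := by unfold Pre_find_enclosed_substrings_py; infer_instance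

def pvWitness_find_enclosed_substrings_py : String × String × String := ("x{{a}}y", "{{", "}}")

def Spec_find_enclosed_substrings_py (input_string : String) (start_delimiter : String) (end_delimiter : String) (out : List String) : Prop := out = find_enclosed_substrings_py_alt input_string start_delimiter end_delimiter
instance (input_string : String) (start_delimiter : String) (end_delimiter : String) (out : List String) : Decidable (Spec_find_enclosed_substrings_py input_string start_delimiter end_delimiter out) := by unfold Spec_find_enclosed_substrings_py; infer_instance

-- ===== CLAIM (what is proved, stated in full; the proofs are below) =====
def Claim_equal_find_enclosed_substrings_py : Prop := ∀ (input_string : String) (start_delimiter : String) (end_delimiter : String), Dom_find_enclosed_substrings_py input_string start_delimiter end_delimiter → Pre_find_enclosed_substrings_py input_string start_delimiter end_delimiter → Spec_find_enclosed_substrings_py input_string start_delimiter end_delimiter (find_enclosed_substrings_py input_string start_delimiter end_delimiter)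

-- ===== LEMMAS AND PROOFS =====

theorem mem_pvOcc {inp sub : List Char} {i : Nat} :
    i ∈ pvOcc inp sub ↔ i ≤ inp.length ∧ sub <+: inp.drop i := by
  simp [pvOcc, List.mem_filter, List.mem_range, PySem.Chars.startswith_iff, Nat.lt_succ_iff]

theorem pvOcc_pairwise (inp sub : List Char) : (pvOcc inp sub).Pairwise (· < ·) :=
  (List.pairwise_lt_range).filter _

theorem dropWhile_append_of_all {l₁ l₂ : List Nat} {p : Nat → Bool}
    (h : ∀ i ∈ l₁, p i = true) :
    (l₁ ++ l₂).dropWhile p = l₂.dropWhile p := by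
  induction l₁ with
  | nil => rfl
  | cons a t ih =>
      simp only [List.cons_append, List.dropWhile_cons, h a (by simp)]
      exact ih (fun i hi => h i (by simp [hi]))

theorem sorted_dropWhile_lt_nil {l : List Nat} {k : Nat}
    (h : l.dropWhile (fun i => decide (i < k)) = []) : ∀ i ∈ l, i < k := by
  intro i hi
  have hsplit := List.takeWhile_append_dropWhile (p := fun i => decide (i < k)) (l := l)
  rw [h, List.append_nil] at hsplit
  have := List.mem_takeWhile_imp (hsplit ▸ hi)
  simpa using this

theorem sorted_dropWhile_lt_cons {l : List Nat} {k j : Nat} {rest : List Nat}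
    (hs : l.Pairwise (· < ·))
    (h : l.dropWhile (fun i => decide (i < k)) = j :: rest) :
    k ≤ j ∧ j ∈ l ∧ ∀ i ∈ l, i < j → i < k := by
  have hne : l.dropWhile (fun i => decide (i < k)) ≠ [] := by simp [h]
  have hhead := List.head_dropWhile_not (fun i => decide (i < k)) hne
  simp only [h, List.head_cons, decide_eq_false_iff_not, Nat.not_lt] at hhead
  have hsub : (l.dropWhile (fun i => decide (i < k))).Sublist l := List.dropWhile_sublist _
  have hmem : j ∈ l := hsub.mem (by simp [h])
  refine ⟨hhead, hmem, ?_⟩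
  intro i hi hij
  have hsplit := List.takeWhile_append_dropWhile (p := fun i => decide (i < k)) (l := l)
  rw [h] at hsplit
  rw [← hsplit] at hi
  rcases List.mem_append.1 hi with hi | hi
  · simpa using List.mem_takeWhile_imp hi
  · rcases List.mem_cons.1 hi with rfl | hi
    · omega
    · exfalso
      have hpw : (j :: rest).Pairwise (· < ·) := h ▸ List.Pairwise.sublist (List.dropWhile_sublist _) hs
      have := (List.pairwise_cons.1 hpw).1 i hi
      omega

-- findFrom at position k: no occurrence position ≥ k means -1 …
theorem findFrom_eq_neg_one (inp sub : List Char) (k : Nat) (hk : k ≤ inp.length)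
    (hdw : (pvOcc inp sub).dropWhile (fun i => decide (i < k)) = []) :
    PySem.Chars.findFrom inp sub ↑k = -1 := by
  rw [PySem.Chars.findFrom_natCast_eq_neg_one_iff inp sub k hk]
  intro hinf
  have hlt := sorted_dropWhile_lt_nil hdw
  have hex : ∃ j, sub <+: (inp.drop k).drop j :=
    (PySem.Chars.exists_prefix_drop_iff_isIn sub (inp.drop k)).2
      ((PySem.Chars.isIn_iff_infix sub (inp.drop k)).2 hinf)
  obtain ⟨j, hj⟩ := hex
  rw [List.drop_drop] at hj
  by_cases hle : k + j ≤ inp.length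
  · have hmem : k + j ∈ pvOcc inp sub := mem_pvOcc.2 ⟨hle, hj⟩
    have := hlt _ hmem
    omega
  · -- past the end: the prefix forces sub = [], so k itself is an occurrence
    have hdropnil : inp.drop (k + j) = [] := by
      rw [List.drop_eq_nil_iff]; omega
    rw [hdropnil] at hj
    have hsubnil : sub = [] := List.prefix_nil.1 hj
    have hmem : k ∈ pvOcc inp sub := mem_pvOcc.2 ⟨hk, by simp [hsubnil]⟩
    have := hlt _ hmem
    omega

-- … and the first occurrence position ≥ k is the head of the dropped sorted occurrence list
theorem findFrom_eq_pos (inp sub : List Char) (k : Nat) (hk : k ≤ inp.length)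
    {j : Nat} {rest : List Nat}
    (hdw : (pvOcc inp sub).dropWhile (fun i => decide (i < k)) = j :: rest) :
    PySem.Chars.findFrom inp sub ↑k = (j : Int) := by
  obtain ⟨hkj, hjmem, hmin⟩ := sorted_dropWhile_lt_cons (pvOcc_pairwise inp sub) hdw
  obtain ⟨hjn, hjp⟩ := mem_pvOcc.1 hjmem
  have hne : PySem.Chars.findFrom inp sub ↑k ≠ -1 := by
    rw [ne_eq, PySem.Chars.findFrom_natCast_eq_neg_one_iff inp sub k hk]
    push_neg
    have hpre : sub <+: (inp.drop k).drop (j - k) := by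
      rw [List.drop_drop]
      have hjk : k + (j - k) = j := by omega
      rw [hjk]; exact hjp
    exact (PySem.Chars.isIn_iff_infix sub (inp.drop k)).1
      ((PySem.Chars.exists_prefix_drop_iff_isIn sub (inp.drop k)).1 ⟨_, hpre⟩)
  obtain ⟨hkf, hfp, hfmin⟩ := PySem.Chars.findFrom_natCast_spec inp sub k hk hne
  have hfle : PySem.Chars.findFrom inp sub ↑k ≤ (inp.length : Int) := by
    rw [PySem.Chars.findFrom_natCast inp sub k hk]
    split
    · omega
    · have h1 := PySem.Chars.find_le_length (inp.drop k) sub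
      rw [List.length_drop] at h1
      omega
  set f := PySem.Chars.findFrom inp sub ↑k with hfdef
  have hf0 : (0 : Int) ≤ f := le_trans (by exact_mod_cast Int.ofNat_nonneg k) hkf
  have hmn : f.toNat ≤ inp.length := by omega
  have hmmem : f.toNat ∈ pvOcc inp sub := mem_pvOcc.2 ⟨hmn, hfp⟩
  rcases Nat.lt_trichotomy f.toNat j with hlt | heq | hgt
  · exfalso
    have := hmin _ hmmem hlt
    omega
  · omega
  · exact absurd hjp (hfmin j hkj hgt)

-- B may skip leading start positions below the cursor one by one; that is a dropWhile
theorem goB_skip (inp : List Char) (ls le : Nat) (ends : List Nat) (c : Nat) :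
    ∀ starts, goB inp ls le starts ends c
      = goB inp ls le (starts.dropWhile (fun i => decide (i < c))) ends c := by
  intro starts
  induction starts with
  | nil => rfl
  | cons sp rest ih =>
      by_cases hsp : sp < c
      · rw [List.dropWhile_cons]
        simp only [hsp, decide_true, if_true]
        rw [← ih]
        simp [goB, hsp]
      · rw [List.dropWhile_cons]
        simp [hsp]

-- the main loop invariant: A's scan position equals B's cursor, and B holds exactly the
-- occurrence-list suffixes whose dropped prefixes lie strictly below the cursor
theorem loop_eq (inp s e : List Char) (hse : 1 ≤ s.length + e.length) :
    ∀ fuel cursor preS sufS preE sufE,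
      pvOcc inp s = preS ++ sufS → (∀ i ∈ preS, i < cursor) →
      pvOcc inp e = preE ++ sufE → (∀ i ∈ preE, i < cursor) →
      cursor ≤ inp.length → inp.length + 2 ≤ fuel + cursor →
      goA inp s e fuel ↑cursor = goB inp s.length e.length sufS sufE cursor := by
  intro fuel
  induction fuel with
  | zero => intro cursor _ _ _ _ _ _ _ _ hc hf; omega
  | succ fuel ih =>
      intro cursor preS sufS preE sufE hS hpreS hE hpreE hc hf
      have hdwS : (pvOcc inp s).dropWhile (fun i => decide (i < cursor))
          = sufS.dropWhile (fun i => decide (i < cursor)) := by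
        rw [hS]; exact dropWhile_append_of_all (by intro i hi; simpa using hpreS i hi)
      rw [goB_skip]
      cases hD : sufS.dropWhile (fun i => decide (i < cursor)) with
      | nil =>
          have hfA := findFrom_eq_neg_one inp s cursor hc (hdwS.trans hD)
          simp [goA, goB, hfA]
      | cons sp rest =>
          have hfA := findFrom_eq_pos inp s cursor hc (hdwS.trans hD)
          obtain ⟨hcsp, hspmem, hspmin⟩ :=
            sorted_dropWhile_lt_cons (pvOcc_pairwise inp s) (hdwS.trans hD)
          obtain ⟨hspn, hspp⟩ := mem_pvOcc.1 hspmem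
          have hsplen : sp + s.length ≤ inp.length := by
            have := hspp.length_le
            rw [List.length_drop] at this
            omega
          have hdwE : (pvOcc inp e).dropWhile (fun i => decide (i < sp + s.length))
              = sufE.dropWhile (fun i => decide (i < sp + s.length)) := by
            rw [hE]
            exact dropWhile_append_of_all
              (by intro i hi; have := hpreE i hi; simp; omega)
          have hcast : (sp : Int) + (s.length : Int) = ((sp + s.length : Nat) : Int) := by
            push_cast; ring
          simp only [goA, hfA]
          rw [if_neg (by omega), hcast]
          cases hEd : sufE.dropWhile (fun ep => decide (ep < sp + s.length)) with
          | nil =>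
              have hfE := findFrom_eq_neg_one inp e (sp + s.length) hsplen (hdwE.trans hEd)
              rw [hfE]
              simp only [goB, if_neg (by omega : ¬ sp < cursor), hEd]
              simp
          | cons ep erest =>
              have hfE := findFrom_eq_pos inp e (sp + s.length) hsplen (hdwE.trans hEd)
              obtain ⟨hthr, hepmem, hepmin⟩ :=
                sorted_dropWhile_lt_cons (pvOcc_pairwise inp e) (hdwE.trans hEd)
              obtain ⟨hepn, hepp⟩ := mem_pvOcc.1 hepmem
              have heplen : ep + e.length ≤ inp.length := by
                have := hepp.length_le
                rw [List.length_drop] at this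
                omega
              have hcast2 : (ep : Int) + (e.length : Int) = ((ep + e.length : Nat) : Int) := by
                push_cast; ring
              rw [hfE, if_neg (by omega), hcast2]
              simp only [goB, if_neg (by omega : ¬ sp < cursor), hEd]
              congr 1
              refine ih (ep + e.length)
                (preS ++ sufS.takeWhile (fun i => decide (i < cursor)) ++ [sp]) rest
                (preE ++ sufE.takeWhile (fun ep => decide (ep < sp + s.length))) (ep :: erest)
                ?_ ?_ ?_ ?_ (by omega) (by omega)
              · rw [hS]
                have h1 : sufS = sufS.takeWhile (fun i => decide (i < cursor))
                    ++ (sp :: rest) := by rw [← hD, List.takeWhile_append_dropWhile]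
                conv_lhs => rw [h1]
                simp
              · intro i hi
                simp only [List.mem_append, List.mem_singleton] at hi
                rcases hi with (hi | hi) | rfl
                · have := hpreS i hi; omega
                · have := List.mem_takeWhile_imp hi; simp at this; omega
                · omega
              · rw [hE]
                have h2 : sufE = sufE.takeWhile (fun ep => decide (ep < sp + s.length))
                    ++ (ep :: erest) := by rw [← hEd, List.takeWhile_append_dropWhile]
                conv_lhs => rw [h2]
                simp
              · intro i hi
                rcases List.mem_append.1 hi with hi | hi
                · have := hpreE i hi; omega
                · have := List.mem_takeWhile_imp hi; simp at this; omega

theorem toList_eq_nil_iff_str (s : String) : s.toList = [] ↔ s = "" := by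
  constructor
  · intro h
    cases s
    simp_all
  · intro h; simp [h]

-- ===== VERDICT (by name: the statement is the Claim_ definition above) =====
theorem find_enclosed_substrings_py_spec : Claim_equal_find_enclosed_substrings_py := by
  intro input_string start_delimiter end_delimiter _ hpre
  unfold Spec_find_enclosed_substrings_py
  unfold find_enclosed_substrings_py find_enclosed_substrings_py_alt
  have hse : 1 ≤ start_delimiter.toList.length + end_delimiter.toList.length := by
    by_contra h
    push_neg at h
    have h1 : start_delimiter.toList = [] := by
      cases hl : start_delimiter.toList <;> simp_all
    have h2 : end_delimiter.toList = [] := by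
      cases hl : end_delimiter.toList <;> simp_all
    exact hpre ⟨(toList_eq_nil_iff_str _).1 h1, (toList_eq_nil_iff_str _).1 h2⟩
  have hmain := loop_eq input_string.toList start_delimiter.toList end_delimiter.toList hse
    (input_string.toList.length + 2) 0 [] (pvOcc input_string.toList start_delimiter.toList)
    [] (pvOcc input_string.toList end_delimiter.toList)
    (by simp) (by simp) (by simp) (by simp) (by simp) (by omega)
  simpa using hmain
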